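-- pv_equiv track=rewrite | github.com/Dimasola/homework | 4 урок/project6.py | gen_cycle
-- ===== SOURCE A (Python) =====
-- from itertools import count, cycle
--
-- def gen_cycle(arg1, arg2):
--     namber2 = []
--     el=0
--     for i in cycle(arg1):
--         if el >= arg2:
--             break
--         else:
--             el+=1
--             namber2.append(i)
--     return namber2
-- ===== SOURCE B (Python) =====
-- def gen_cycle(arg1, arg2):
--     seq = list(arg1)
--     if not seq or arg2 <= 0:
--         return []
--     q, r = divmod(arg2, len(seq))
--     return seq * q + seq[:r]
-- ===== Notes on version B (the rewrite author's own statement) =====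
-- stated objective: simpler
-- what changed: Replaces the element-by-element cycle loop with a counter by a closed-form divmod construction: whole copies of the sequence plus a partial prefix slice.
import Mathlib
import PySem

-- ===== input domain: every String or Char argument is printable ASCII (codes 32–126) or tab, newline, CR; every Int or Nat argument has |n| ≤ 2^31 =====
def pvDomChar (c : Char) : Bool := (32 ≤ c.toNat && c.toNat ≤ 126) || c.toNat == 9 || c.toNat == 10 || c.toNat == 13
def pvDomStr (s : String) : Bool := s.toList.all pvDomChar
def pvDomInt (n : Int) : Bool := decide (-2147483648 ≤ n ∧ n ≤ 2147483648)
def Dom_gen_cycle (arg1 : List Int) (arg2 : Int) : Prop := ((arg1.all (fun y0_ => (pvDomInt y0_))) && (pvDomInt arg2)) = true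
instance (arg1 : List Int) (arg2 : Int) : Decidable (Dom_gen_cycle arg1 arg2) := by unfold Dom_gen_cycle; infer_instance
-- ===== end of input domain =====

-- B replaces A's one-element-at-a-time cycle loop by a closed-form divmod construction (whole copies + partial prefix); objective: simpler.

-- ===== PORT A =====
-- A's for-loop over cycle(arg1): at each step take the head of the current
-- cycle position (restarting at arg1 when exhausted), until the counter
-- reaches arg2; the number of iterations is arg2.toNat (el >= arg2 breaks
-- immediately for arg2 <= 0), and cycle of an empty list yields nothing.
def gen_cycleAux (arg1 : List Int) : Nat → List Int → List Int
  | 0, _ => []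
  | n+1, x :: rest => x :: gen_cycleAux arg1 n rest
  | n+1, [] =>          -- cycle position exhausted: restart at arg1 (cycle of [] yields nothing)
    match arg1 with
    | [] => []
    | x :: rest => x :: gen_cycleAux arg1 n rest

def gen_cycle (arg1 : List Int) (arg2 : Int) : List Int :=
  gen_cycleAux arg1 arg2.toNat arg1

-- ===== PORT B =====
def gen_cycle_alt (arg1 : List Int) (arg2 : Int) : List Int :=
  if arg1 = [] ∨ arg2 ≤ 0 then []
  else
    let q := PySem.Int.floordiv arg2 (arg1.length : Int)
    let r := PySem.Int.mod arg2 (arg1.length : Int)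
    (List.replicate q.toNat arg1).flatten ++ PySem.List.slice arg1 none (some r)

-- ===== PRECONDITION & SPEC =====
def Spec_gen_cycle (arg1 : List Int) (arg2 : Int) (out : List Int) : Prop := out = gen_cycle_alt arg1 arg2
instance (arg1 : List Int) (arg2 : Int) (out : List Int) : Decidable (Spec_gen_cycle arg1 arg2 out) := by unfold Spec_gen_cycle; infer_instance

-- ===== CLAIM (what is proved, stated in full; the proofs are below) =====
def Claim_equal_gen_cycle : Prop := ∀ (arg1 : List Int) (arg2 : Int), Dom_gen_cycle arg1 arg2 → Spec_gen_cycle arg1 arg2 (gen_cycle arg1 arg2)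

-- ===== LEMMAS AND PROOFS =====

lemma aux_nil_arg1 (n : Nat) : gen_cycleAux [] n [] = [] := by
  cases n <;> rfl

lemma aux_restart (arg1 : List Int) (n : Nat) :
    gen_cycleAux arg1 n [] = gen_cycleAux arg1 n arg1 := by
  cases n <;> cases arg1 <;> rfl

lemma aux_small (arg1 : List Int) : ∀ (cur : List Int) (n : Nat), n ≤ cur.length →
    gen_cycleAux arg1 n cur = cur.take n := by
  intro cur
  induction cur with
  | nil => intro n h; simp only [List.length_nil, Nat.le_zero] at h; subst h; rfl
  | cons c cs ih =>
    intro n h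
    cases n with
    | zero => simp [gen_cycleAux]
    | succ m =>
      simp [gen_cycleAux, ih m (by simpa using h)]

lemma aux_split (arg1 : List Int) : ∀ (cur : List Int) (n : Nat), cur.length ≤ n →
    gen_cycleAux arg1 n cur = cur ++ gen_cycleAux arg1 (n - cur.length) [] := by
  intro cur
  induction cur with
  | nil => intro n h; simp
  | cons c cs ih =>
    intro n h
    cases n with
    | zero => simp at h
    | succ m =>
      have h' : cs.length ≤ m := by simpa using h
      simp [gen_cycleAux, ih m h']

lemma aux_closed (arg1 : List Int) (h : arg1 ≠ []) : ∀ (n : Nat),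
    gen_cycleAux arg1 n arg1 =
      (List.replicate (n / arg1.length) arg1).flatten ++ arg1.take (n % arg1.length) := by
  intro n
  induction n using Nat.strong_induction_on with
  | _ n ih =>
    have hL : 0 < arg1.length := List.length_pos_iff.mpr h
    by_cases hn : n < arg1.length
    · rw [aux_small arg1 arg1 n (le_of_lt hn)]
      rw [Nat.div_eq_of_lt hn, Nat.mod_eq_of_lt hn]
      simp
    · push_neg at hn
      have hsub : n - arg1.length < n := by omega
      rw [aux_split arg1 arg1 n (by omega), aux_restart, ih _ hsub]
      rw [Nat.div_eq_sub_div hL hn, Nat.mod_eq_sub_mod hn]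
      simp [List.replicate_succ, List.append_assoc]

lemma alt_closed (arg1 : List Int) (arg2 : Int) (h1 : arg1 ≠ []) (h2 : 0 < arg2) :
    gen_cycle_alt arg1 arg2 =
      (List.replicate (arg2.toNat / arg1.length) arg1).flatten ++ arg1.take (arg2.toNat % arg1.length) := by
  unfold gen_cycle_alt
  rw [if_neg (by push_neg; exact ⟨h1, by omega⟩)]
  obtain ⟨m, hm⟩ := Int.eq_ofNat_of_zero_le (le_of_lt h2)
  subst hm
  rw [PySem.Int.floordiv_natCast m arg1.length, PySem.Int.mod_natCast m arg1.length,
    Int.toNat_natCast]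
  simp only [PySem.List.slice_to_natCast, Int.toNat_natCast]

-- ===== VERDICT (by name: the statement is the Claim_ definition above) =====
theorem gen_cycle_spec : Claim_equal_gen_cycle := by
  intro arg1 arg2 _
  unfold Spec_gen_cycle gen_cycle
  by_cases h1 : arg1 = []
  · subst h1
    simp [aux_nil_arg1, gen_cycle_alt]
  · by_cases h2 : arg2 ≤ 0
    · have : arg2.toNat = 0 := by omega
      rw [this]
      have : gen_cycle_alt arg1 arg2 = [] := by unfold gen_cycle_alt; rw [if_pos (Or.inr h2)]
      rw [this]
      rfl
    · rw [aux_closed arg1 h1, alt_closed arg1 arg2 h1 (by omega)]
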